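-- pv_equiv track=rewrite | github.com/volbergm/brew-licenses | brew-licenses.py | group_packages_by_license
-- ===== SOURCE A (Python) =====
-- from collections import defaultdict
--
-- def group_packages_by_license(packages):
--     """Group Homebrew packages by their license type."""
--     license_packages = defaultdict(list)
--     for package in packages:
--         if not package:
--             continue
--         license_type = package.get('license', 'Unknown') or 'Unknown'
--         package_name = package.get('name', 'Unknown')
--         if isinstance(package_name, list):
--             package_name = package_name[0]
--         license_packages[license_type].append(package_name)
--     return dict(sorted(license_packages.items(), key=lambda x: (x[0] or 'Unknown')))
-- ===== SOURCE B (Python) =====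
-- from itertools import groupby
--
--
-- def _entry(package):
--     license_type = package.get('license', 'Unknown') or 'Unknown'
--     package_name = package.get('name', 'Unknown')
--     if isinstance(package_name, list):
--         package_name = package_name[0]
--     return (license_type, package_name)
--
--
-- def group_packages_by_license(packages):
--     """Group Homebrew packages by their license type (sort-then-groupby)."""
--     pairs = sorted((_entry(p) for p in packages if p), key=lambda t: t[0])
--     return {lic: [name for _, name in grp]
--             for lic, grp in groupby(pairs, key=lambda t: t[0])}
-- ===== Notes on version B (the rewrite author's own statement) =====
-- stated objective: alternative
-- what changed: Replaces the defaultdict accumulation pass plus final sorted(items) with a flat (license, name) tuple list that is stably sorted by license and then grouped with itertools.groupby, so no dict is built during the scan.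
import Mathlib
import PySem

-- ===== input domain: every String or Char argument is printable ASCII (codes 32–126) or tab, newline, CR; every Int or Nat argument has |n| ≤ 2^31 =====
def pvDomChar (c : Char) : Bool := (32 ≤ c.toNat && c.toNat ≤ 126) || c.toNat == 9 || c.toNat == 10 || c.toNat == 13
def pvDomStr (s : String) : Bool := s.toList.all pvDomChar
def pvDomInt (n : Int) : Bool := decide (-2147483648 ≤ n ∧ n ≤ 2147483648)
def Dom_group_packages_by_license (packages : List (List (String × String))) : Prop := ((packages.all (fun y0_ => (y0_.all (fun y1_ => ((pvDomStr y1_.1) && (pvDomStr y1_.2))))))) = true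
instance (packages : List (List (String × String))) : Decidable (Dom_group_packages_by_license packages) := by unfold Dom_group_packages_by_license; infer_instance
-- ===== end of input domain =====

-- B replaces A's defaultdict-accumulate-then-sort-items with sort-the-flat-pair-list-then-group-consecutive (alternative decomposition, same result).
-- Under the type convention a package's values are strings, so A's `isinstance(package_name, list)` branch can never fire and is not ported.

-- ===== PORT A =====
-- dict accumulation loop, then dict(sorted(items, key=lambda x: x[0] or 'Unknown'));
-- dict() over the sorted items (distinct keys) is the identity on the association list.
def group_packages_by_license (packages : List (List (String × String))) : List (String × List String) :=
  let license_packages : PySem.Dict String (List String) :=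
    packages.foldl (fun d package =>
      if package = [] then d
      else
        let license_type0 := (PySem.Dict.mk package).getD "license" "Unknown"
        let license_type := if license_type0 = "" then "Unknown" else license_type0
        let package_name := (PySem.Dict.mk package).getD "name" "Unknown"
        d.modify license_type [] (fun v => v ++ [package_name])) PySem.Dict.empty
  PySem.List.sorted license_packages.items (fun x => if x.1 = "" then "Unknown" else x.1) false

-- ===== PORT B =====
-- _entry(package): the (license_type, package_name) tuple
def pvEntry (package : List (String × String)) : String × String :=
  let license_type0 := (PySem.Dict.mk package).getD "license" "Unknown"
  let license_type := if license_type0 = "" then "Unknown" else license_type0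
  (license_type, (PySem.Dict.mk package).getD "name" "Unknown")

-- itertools.groupby over a list of (key, name) pairs, collecting each run's names
def pvGroupby : List (String × String) → List (String × List String)
  | [] => []
  | (k, n) :: rest =>
      (k, n :: (rest.takeWhile (fun t => t.1 == k)).map (fun t => t.2)) ::
      pvGroupby (rest.dropWhile (fun t => t.1 == k))
  termination_by l => l.length
  decreasing_by
    simp only [List.length_cons]
    exact Nat.lt_succ_of_le (List.dropWhile_sublist _).length_le

def group_packages_by_license_alt (packages : List (List (String × String))) : List (String × List String) :=
  pvGroupby (PySem.List.sorted ((packages.filter (fun p => !p.isEmpty)).map pvEntry) (fun t => t.1) false)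

-- ===== PRECONDITION & SPEC =====
def Spec_group_packages_by_license (packages : List (List (String × String))) (out : List (String × List String)) : Prop := out = group_packages_by_license_alt packages
instance (packages : List (List (String × String))) (out : List (String × List String)) : Decidable (Spec_group_packages_by_license packages out) := by unfold Spec_group_packages_by_license; infer_instance

-- ===== CLAIM (what is proved, stated in full; the proofs are below) =====
def Claim_equal_group_packages_by_license : Prop := ∀ (packages : List (List (String × String))), Dom_group_packages_by_license packages → Spec_group_packages_by_license packages (group_packages_by_license packages)

-- ===== LEMMAS AND PROOFS =====

-- the flat (license, name) pair list both programs are about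
def pvPairs (packages : List (List (String × String))) : List (String × String) :=
  (packages.filter (fun p => !p.isEmpty)).map pvEntry

theorem pvEntry_fst_ne (package : List (String × String)) : (pvEntry package).1 ≠ "" := by
  unfold pvEntry
  by_cases h : (PySem.Dict.mk package).getD "license" "Unknown" = "" <;> simp [h]

-- A's skip-empty accumulation loop is the plain grouping fold over pvPairs
theorem pv_fold_eq (l : List (List (String × String))) (d : PySem.Dict String (List String)) :
    l.foldl (fun d package =>
      if package = [] then d
      else
        let license_type0 := (PySem.Dict.mk package).getD "license" "Unknown"
        let license_type := if license_type0 = "" then "Unknown" else license_type0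
        let package_name := (PySem.Dict.mk package).getD "name" "Unknown"
        d.modify license_type [] (fun v => v ++ [package_name])) d
    = (pvPairs l).foldl (fun d p => d.modify p.1 [] (fun v => v ++ [p.2])) d := by
  induction l generalizing d with
  | nil => rfl
  | cons p l ih =>
      by_cases hp : p = [] <;>
        simp [pvPairs, hp, pvEntry, ih, List.foldl_cons]

-- stability: filtering a key-class out of insertBy (into a key-sorted list)
theorem pv_filter_insertBy {α : Type} (key : α → String) (c : String) (x : α) (ys : List α)
    (h : ys.Pairwise (fun a b => key a ≤ key b)) :
    (PySem.List.insertBy (fun a b => decide (key a < key b)) x ys).filter (fun y => key y == c)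
      = ys.filter (fun y => key y == c) ++ (if key x == c then [x] else []) := by
  induction ys with
  | nil =>
      by_cases hc : (key x == c) = true <;>
        simp [PySem.List.insertBy, hc]
  | cons y ys ih =>
      rw [List.pairwise_cons] at h
      rw [PySem.List.insertBy.eq_2]
      by_cases hlt : key x < key y
      · rw [if_pos (by simpa using hlt)]
        by_cases hc : (key x == c) = true
        · have hxc : key x = c := by simpa using hc
          have hnil : (y :: ys).filter (fun y => key y == c) = [] := by
            rw [List.filter_eq_nil_iff]
            intro a ha hac
            have h1 : key y ≤ key a := by
              rcases List.mem_cons.mp ha with h' | h'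
              · rw [h']
              · exact h.1 a h'
            have h2 : key a = c := by simpa using hac
            have : key x < key x := by
              calc key x < key y := hlt
                _ ≤ key a := h1
                _ = key x := by rw [h2, hxc]
            exact absurd this (lt_irrefl _)
          rw [hnil, List.filter_cons, if_pos hc, hnil, if_pos hc]
          rfl
        · rw [List.filter_cons, if_neg hc, if_neg hc, List.append_nil]
      · rw [if_neg (by simpa using hlt)]
        rw [List.filter_cons, ih h.2, List.filter_cons]
        by_cases hyc : (key y == c) = true <;> simp [hyc]

-- stability: filtering a key-class commutes with PySem's stable sort
theorem pv_filter_sorted {α : Type} (l : List α) (key : α → String) (c : String) :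
    (PySem.List.sorted l key).filter (fun y => key y == c) = l.filter (fun y => key y == c) := by
  have aux : ∀ (l acc : List α), acc.Pairwise (fun a b => key a ≤ key b) →
      (l.foldl (fun acc x => PySem.List.insertBy (fun a b => decide (key a < key b)) x acc) acc).filter
          (fun y => key y == c)
        = acc.filter (fun y => key y == c) ++ l.filter (fun y => key y == c) := by
    intro l
    induction l with
    | nil => intro acc _; simp
    | cons x l ih =>
        intro acc h
        rw [List.foldl_cons, ih _ (PySem.List.insertBy_pairwise_le key x acc h),
          pv_filter_insertBy key c x acc h, List.filter_cons, List.append_assoc]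
        by_cases hc : (key x == c) = true <;> simp [hc]
  rw [PySem.List.sorted_eq_foldl_insertBy]
  simpa using aux l [] (by simp)

-- Set.ofList is a sublist (first occurrences in order)
theorem pv_ofList_sublist (l : List String) : List.Sublist (PySem.Set.ofList l) l := by
  induction l with
  | nil => simp [PySem.Set.ofList]
  | cons x xs ih =>
      rw [PySem.Set.ofList_cons]
      refine List.Sublist.cons₂ x (List.Sublist.trans ?_ ih)
      simp only [PySem.Set.discard]
      exact List.filter_sublist

-- discarding the key of a leading run from ofList
theorem pv_discard_run (k : String) : ∀ (xs ys : List String), (∀ a ∈ xs, a = k) → k ∉ ys →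
    PySem.Set.discard (PySem.Set.ofList (xs ++ ys)) k = PySem.Set.ofList ys := by
  intro xs
  induction xs with
  | nil =>
      intro ys _ hy
      simp only [List.nil_append, PySem.Set.discard]
      apply List.filter_eq_self.mpr
      intro a ha
      have ha' : a ∈ ys := (PySem.Set.mem_ofList _ _).mp ha
      cases hak : (a == k) with
      | false => simp
      | true =>
          exfalso
          exact hy (by rwa [eq_of_beq hak] at ha')
  | cons b xs ih =>
      intro ys hx hy
      have hb : b = k := hx b (by simp)
      subst hb
      rw [List.cons_append, PySem.Set.ofList_cons]
      simp only [PySem.Set.discard, List.filter_cons, beq_self_eq_true, Bool.not_true,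
        Bool.false_eq_true, if_false, List.filter_filter]
      simp only [Bool.and_self]
      have := ih ys (fun a ha => hx a (List.mem_cons_of_mem _ ha)) hy
      simpa [PySem.Set.discard] using this

theorem pv_ofList_run (k : String) (xs ys : List String)
    (hx : ∀ a ∈ xs, a = k) (hy : k ∉ ys) :
    PySem.Set.ofList (k :: (xs ++ ys)) = k :: PySem.Set.ofList ys := by
  rw [PySem.Set.ofList_cons, pv_discard_run k xs ys hx hy]

-- the first element surviving dropWhile fails the predicate
theorem pv_dropWhile_head {α : Type} (p : α → Bool) : ∀ (l : List α) (a : α) (t : List α),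
    l.dropWhile p = a :: t → p a = false := by
  intro l
  induction l with
  | nil => intro a t h; simp [List.dropWhile] at h
  | cons x xs ih =>
      intro a t h
      by_cases hx : p x = true
      · rw [List.dropWhile_cons, if_pos hx] at h
        exact ih a t h
      · rw [List.dropWhile_cons, if_neg hx] at h
        cases h
        simpa using hx

-- groupby of a key-sorted pair list, characterised by keys and filters
theorem pv_groupby_sorted (s : List (String × String)) :
    s.Pairwise (fun a b => a.1 ≤ b.1) →
    pvGroupby s =
      (PySem.Set.ofList (s.map (fun t => t.1))).map
        (fun k => (k, (s.filter (fun t => t.1 == k)).map (fun t => t.2))) := by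
  induction s using pvGroupby.induct with
  | case1 => intro _; simp [pvGroupby]
  | case2 k nm rest ih =>
      intro h
      rw [List.pairwise_cons] at h
      obtain ⟨hhead, hrest⟩ := h
      have hsplit : rest.takeWhile (fun p => p.1 == k) ++ rest.dropWhile (fun p => p.1 == k) = rest :=
        List.takeWhile_append_dropWhile
      have htk : ∀ a ∈ rest.takeWhile (fun p => p.1 == k), a.1 = k := by
        intro a ha
        exact eq_of_beq (List.mem_takeWhile_imp (p := fun p : String × String => (p.1 == k)) ha)
      have hdpw : (rest.dropWhile (fun p => p.1 == k)).Pairwise (fun a b => a.1 ≤ b.1) :=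
        List.Pairwise.sublist (List.dropWhile_sublist _) hrest
      have hdgt : ∀ a ∈ rest.dropWhile (fun p => p.1 == k), k < a.1 := by
        cases hDW : rest.dropWhile (fun p => p.1 == k) with
        | nil => intro a ha; simp at ha
        | cons d0 d' =>
            have hd0 : k < d0.1 := by
              have hmem : d0 ∈ rest :=
                (List.dropWhile_sublist _).subset (by rw [hDW]; exact List.mem_cons_self)
              have hle : k ≤ d0.1 := hhead d0 hmem
              have hne : d0.1 ≠ k := by
                simpa using pv_dropWhile_head _ rest d0 d' hDW
              exact lt_of_le_of_ne hle (Ne.symm hne)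
            intro a ha
            rcases List.mem_cons.mp ha with rfl | ha'
            · exact hd0
            · rw [hDW] at hdpw
              exact lt_of_lt_of_le hd0 ((List.pairwise_cons.mp hdpw).1 a ha')
      have hne_k : ∀ a ∈ rest.dropWhile (fun p => p.1 == k), a.1 ≠ k :=
        fun a ha => (hdgt a ha).ne'
      have hkeys : PySem.Set.ofList (((k, nm) :: rest).map (fun t => t.1))
          = k :: PySem.Set.ofList ((rest.dropWhile (fun p => p.1 == k)).map (fun t => t.1)) := by
        have hmap : ((k, nm) :: rest).map (fun t => t.1)
            = k :: ((rest.takeWhile (fun p => p.1 == k)).map (fun t => t.1)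
                ++ (rest.dropWhile (fun p => p.1 == k)).map (fun t => t.1)) := by
          rw [← List.map_append, hsplit, List.map_cons]
        rw [hmap]
        refine pv_ofList_run k _ _ ?_ ?_
        · intro a ha
          rcases List.mem_map.mp ha with ⟨p, hp, rfl⟩
          exact htk p hp
        · intro hk
          rcases List.mem_map.mp hk with ⟨p, hp, hpk⟩
          exact hne_k p hp hpk
      have hfk : ((k, nm) :: rest).filter (fun p => p.1 == k)
          = (k, nm) :: rest.takeWhile (fun p => p.1 == k) := by
        rw [List.filter_cons, if_pos (by simp)]
        congr 1
        conv_lhs => rw [← hsplit]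
        rw [List.filter_append]
        have h1 : (rest.takeWhile (fun p => p.1 == k)).filter (fun p => p.1 == k)
            = rest.takeWhile (fun p => p.1 == k) :=
          List.filter_eq_self.mpr (fun a ha => List.mem_takeWhile_imp (p := fun p : String × String => (p.1 == k)) ha)
        have h2 : (rest.dropWhile (fun p => p.1 == k)).filter (fun p => p.1 == k) = [] :=
          List.filter_eq_nil_iff.mpr (fun a ha hb => hne_k a ha (eq_of_beq hb))
        rw [h1, h2, List.append_nil]
      have hfk' : ∀ k', k' ≠ k → ((k, nm) :: rest).filter (fun p => p.1 == k')
          = (rest.dropWhile (fun p => p.1 == k)).filter (fun p => p.1 == k') := by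
        intro k' hk'
        rw [List.filter_cons, if_neg (by simpa using (Ne.symm hk'))]
        conv_lhs => rw [← hsplit]
        rw [List.filter_append]
        have h1 : (rest.takeWhile (fun p => p.1 == k)).filter (fun p => p.1 == k') = [] :=
          List.filter_eq_nil_iff.mpr (fun a ha hb => hk' (by rw [← eq_of_beq hb, htk a ha]))
        rw [h1, List.nil_append]
      rw [pvGroupby, ih hdpw, hkeys, List.map_cons]
      congr 1
      · rw [hfk, List.map_cons]
      · apply List.map_congr_left
        intro k' hk'mem
        have hk'd : k' ∈ (rest.dropWhile (fun p => p.1 == k)).map (fun t => t.1) :=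
          (PySem.Set.mem_ofList _ _).mp hk'mem
        rcases List.mem_map.mp hk'd with ⟨p, hp, rfl⟩
        rw [hfk' p.1 (hne_k p hp)]

-- dict facts for A's accumulated dict over pvPairs
theorem pv_dict_keys (ps : List (String × String)) :
    (ps.foldl (fun d p => d.modify p.1 [] (fun v => v ++ [p.2])) (PySem.Dict.empty : PySem.Dict String (List String))).keys
      = PySem.Set.ofList (ps.map (fun p => p.1)) := by
  have h := PySem.Dict.keys_foldl_modify_key ps (fun p => p.1) ([] : List String)
    (fun _ p => fun v => v ++ [p.2]) (PySem.Dict.empty : PySem.Dict String (List String))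
  simpa [PySem.Dict.keys_empty, PySem.Set.ofList_eq_foldl, PySem.Set.update] using h

theorem pv_dict_nodup (ps : List (String × String)) :
    (ps.foldl (fun d p => d.modify p.1 [] (fun v => v ++ [p.2])) (PySem.Dict.empty : PySem.Dict String (List String))).keys.Nodup := by
  have h := PySem.Dict.nodup_keys_foldl_modify_key ps (fun p => p.1) ([] : List String)
    (fun _ p => fun v => v ++ [p.2]) (PySem.Dict.empty : PySem.Dict String (List String))
    (by simp [PySem.Dict.keys_empty])
  simpa using h

theorem pv_dict_items (ps : List (String × String)) :
    (ps.foldl (fun d p => d.modify p.1 [] (fun v => v ++ [p.2])) (PySem.Dict.empty : PySem.Dict String (List String))).items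
      = (PySem.Set.ofList (ps.map (fun p => p.1))).map
          (fun k => (k, (ps.filter (fun p => p.1 == k)).map (fun p => p.2))) := by
  rw [PySem.Dict.items_eq_map_keys _ (pv_dict_nodup ps) ([] : List String), pv_dict_keys ps]
  apply List.map_congr_left
  intro k _
  have h := PySem.Dict.getD_foldl_modify_append ps (PySem.Dict.empty : PySem.Dict String (List String)) k
  simp only [PySem.Dict.getD_empty, List.nil_append] at h
  rw [h]

-- B's port, characterised over pvPairs
theorem pv_alt_eq (packages : List (List (String × String))) :
    group_packages_by_license_alt packages
      = (PySem.Set.ofList ((PySem.List.sorted (pvPairs packages) (fun t => t.1) false).map (fun t => t.1))).map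
          (fun k => (k, ((pvPairs packages).filter (fun p => p.1 == k)).map (fun p => p.2))) := by
  unfold group_packages_by_license_alt
  have hfold : List.map pvEntry (List.filter (fun p => !p.isEmpty) packages) = pvPairs packages := rfl
  rw [hfold, pv_groupby_sorted _ (PySem.List.sorted_pairwise _ _)]
  apply List.map_congr_left
  intro k _
  rw [pv_filter_sorted (pvPairs packages) (fun t => t.1) k]

-- ===== VERDICT (by name: the statement is the Claim_ definition above) =====
theorem group_packages_by_license_spec : Claim_equal_group_packages_by_license := by
  intro packages _
  unfold Spec_group_packages_by_license group_packages_by_license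
  rw [pv_fold_eq]
  simp only [pv_dict_items]
  have hsp : (PySem.List.sorted (pvPairs packages) (fun t => t.1) false).Perm (pvPairs packages) :=
    PySem.List.sorted_perm _ _ _
  have hmemK : ∀ a : String,
      a ∈ PySem.Set.ofList ((PySem.List.sorted (pvPairs packages) (fun t => t.1) false).map (fun t => t.1))
      ↔ a ∈ PySem.Set.ofList ((pvPairs packages).map (fun p => p.1)) := by
    intro a
    rw [PySem.Set.mem_ofList, PySem.Set.mem_ofList]
    exact (hsp.map (fun t => t.1)).mem_iff
  have hKne : ∀ a ∈ PySem.Set.ofList ((PySem.List.sorted (pvPairs packages) (fun t => t.1) false).map (fun t => t.1)),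
      a ≠ "" := by
    intro a ha
    have : a ∈ (pvPairs packages).map (fun p => p.1) := by
      have := (hmemK a).mp ha
      exact (PySem.Set.mem_ofList _ _).mp this
    rcases List.mem_map.mp this with ⟨p, hp, rfl⟩
    rcases List.mem_map.mp hp with ⟨pkg, _, rfl⟩
    exact pvEntry_fst_ne pkg
  have hKlt : (PySem.Set.ofList ((PySem.List.sorted (pvPairs packages) (fun t => t.1) false).map (fun t => t.1))).Pairwise (fun a b => a < b) := by
    have h1 : ((PySem.List.sorted (pvPairs packages) (fun t => t.1) false).map (fun t => t.1)).Pairwise (fun a b => a ≤ b) :=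
      List.pairwise_map.mpr (PySem.List.sorted_pairwise _ _)
    have h2 := List.Pairwise.sublist (pv_ofList_sublist _) h1
    have h3 : (PySem.Set.ofList ((PySem.List.sorted (pvPairs packages) (fun t => t.1) false).map (fun t => t.1))).Pairwise (fun a b => a ≠ b) :=
      PySem.Set.nodup_ofList _
    exact (h2.and h3).imp (fun hab => lt_of_le_of_ne hab.1 hab.2)
  have hA : PySem.List.sorted
      ((PySem.Set.ofList ((pvPairs packages).map (fun p => p.1))).map
        (fun k => (k, (( pvPairs packages).filter (fun p => p.1 == k)).map (fun p => p.2))))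
      (fun x => if x.1 = "" then "Unknown" else x.1) false
      = (PySem.Set.ofList ((PySem.List.sorted (pvPairs packages) (fun t => t.1) false).map (fun t => t.1))).map
        (fun k => (k, ((pvPairs packages).filter (fun p => p.1 == k)).map (fun p => p.2))) := by
    apply PySem.List.sorted_eq_of_perm_of_pairwise_lt
    · refine List.Perm.map _ ?_
      exact (List.perm_ext_iff_of_nodup (PySem.Set.nodup_ofList _) (PySem.Set.nodup_ofList _)).mpr hmemK
    · rw [List.pairwise_map]
      refine List.Pairwise.imp_of_mem ?_ hKlt
      intro a b ha hb hab
      simpa [hKne a ha, hKne b hb] using hab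
  rw [pv_alt_eq packages]
  exact hA
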